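-- pv_equiv track=rewrite | github.com/WashingtonYandun/DSA.py | ListsAlgo/Level_2.py | common_elements_tle
-- ===== SOURCE A (Python) =====
-- def common_elements_tle(A, B, C):
--     '''
--     return the intersecction of 3 arrays
--     '''
--     commons = set()
--     for i in A:
--         if (i in A and i in B and i in C):
--             commons.add(i)
--     commons = list(commons)
--     commons = sorted(commons)
--     return commons
-- ===== SOURCE B (Python) =====
-- def common_elements_tle(A, B, C):
--     '''
--     return the intersecction of 3 arrays
--     '''
--     a = sorted(set(A))
--     b = sorted(set(B))
--     c = sorted(set(C))
--     i = j = k = 0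
--     res = []
--     while i < len(a) and j < len(b) and k < len(c):
--         x, y, z = a[i], b[j], c[k]
--         if x == y and y == z:
--             res.append(x)
--             i += 1
--             j += 1
--             k += 1
--         else:
--             m = min(x, y, z)
--             if x == m:
--                 i += 1
--             if y == m:
--                 j += 1
--             if z == m:
--                 k += 1
--     return res
-- ===== Notes on version B (the rewrite author's own statement) =====
-- stated objective: faster
-- what changed: Replaces A's per-element linear membership scans over all three lists (quadratic) by sorting the deduplicated lists and intersecting them with a single three-pointer merge walk that emits the already-sorted result directly.
import Mathlib
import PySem

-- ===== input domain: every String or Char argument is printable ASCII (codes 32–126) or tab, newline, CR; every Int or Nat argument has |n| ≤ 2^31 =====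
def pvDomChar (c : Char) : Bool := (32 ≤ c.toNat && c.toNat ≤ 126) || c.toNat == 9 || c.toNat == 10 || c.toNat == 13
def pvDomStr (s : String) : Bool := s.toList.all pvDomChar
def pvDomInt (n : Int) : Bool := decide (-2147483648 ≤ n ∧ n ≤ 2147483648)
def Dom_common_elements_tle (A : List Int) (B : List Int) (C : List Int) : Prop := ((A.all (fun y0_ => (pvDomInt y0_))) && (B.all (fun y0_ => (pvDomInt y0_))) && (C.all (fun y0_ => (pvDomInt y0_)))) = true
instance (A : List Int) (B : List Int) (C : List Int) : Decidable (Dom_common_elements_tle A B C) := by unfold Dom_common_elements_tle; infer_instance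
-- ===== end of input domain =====

-- B replaces A's per-element membership scans (quadratic) by sorting the deduplicated
-- lists once and intersecting them with a single three-pointer merge (objective: faster).

-- ===== PORT A =====
-- A iterates over A, keeps i when 'i in A and i in B and i in C' (set of commons), then sorts.
def common_elements_tle (A : List Int) (B : List Int) (C : List Int) : List Int :=
  let commons : PySem.Set Int :=
    A.foldl (fun s i => if i ∈ A ∧ i ∈ B ∧ i ∈ C then PySem.Set.add s i else s) PySem.Set.empty
  PySem.List.sorted commons (fun x => x) false

-- ===== PORT B =====
-- termination helper for the three-pointer loop: the minimum is one of the three heads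
theorem pvMin3_choice (x y z : Int) :
    x = min x (min y z) ∨ y = min x (min y z) ∨ z = min x (min y z) := by
  rcases min_choice x (min y z) with h | h
  · exact Or.inl h.symm
  · rcases min_choice y z with h2 | h2
    · exact Or.inr (Or.inl (by rw [h, h2]))
    · exact Or.inr (Or.inr (by rw [h, h2]))

-- the while-loop of Source B: three pointers over the sorted deduplicated lists
def pvMerge3 : List Int → List Int → List Int → List Int
  | x :: a, y :: b, z :: c =>
    if x = y ∧ y = z then
      x :: pvMerge3 a b c
    else
      pvMerge3 (if x = min x (min y z) then a else x :: a)
               (if y = min x (min y z) then b else y :: b)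
               (if z = min x (min y z) then c else z :: c)
  | _, _, _ => []
termination_by a b c => a.length + b.length + c.length
decreasing_by
  · simp only [List.length_cons]; omega
  · have hch := pvMin3_choice x y z
    split_ifs <;> first | tauto | (simp only [List.length_cons]; omega)

def common_elements_tle_alt (A : List Int) (B : List Int) (C : List Int) : List Int :=
  pvMerge3 (PySem.List.sorted (PySem.Set.ofList A) (fun x => x) false)
           (PySem.List.sorted (PySem.Set.ofList B) (fun x => x) false)
           (PySem.List.sorted (PySem.Set.ofList C) (fun x => x) false)

-- ===== PRECONDITION & SPEC =====
def Spec_common_elements_tle (A : List Int) (B : List Int) (C : List Int) (out : List Int) : Prop := out = common_elements_tle_alt A B C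
instance (A : List Int) (B : List Int) (C : List Int) (out : List Int) : Decidable (Spec_common_elements_tle A B C out) := by unfold Spec_common_elements_tle; infer_instance

-- ===== CLAIM (what is proved, stated in full; the proofs are below) =====
def Claim_equal_common_elements_tle : Prop := ∀ (A : List Int) (B : List Int) (C : List Int), Dom_common_elements_tle A B C → Spec_common_elements_tle A B C (common_elements_tle A B C)

-- ===== LEMMAS AND PROOFS =====

-- no element common to all three lists can equal the minimum of the heads unless all heads agree
theorem pvMerge3_min_notMem {x y z t : Int} {a b c : List Int}
    (ha : (x :: a).Pairwise (· < ·)) (hb : (y :: b).Pairwise (· < ·))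
    (hc : (z :: c).Pairwise (· < ·)) (hne : ¬(x = y ∧ y = z))
    (hta : t ∈ x :: a) (htb : t ∈ y :: b) (htc : t ∈ z :: c) :
    t ≠ min x (min y z) := by
  intro hm
  have hmx : min x (min y z) ≤ x := min_le_left _ _
  have hmy : min x (min y z) ≤ y := le_trans (min_le_right _ _) (min_le_left _ _)
  have hmz : min x (min y z) ≤ z := le_trans (min_le_right _ _) (min_le_right _ _)
  have htx : t = x := by
    rcases List.mem_cons.mp hta with h | h
    · exact h
    · exact absurd (hm ▸ hmx) (not_le.mpr ((List.pairwise_cons.mp ha).1 t h)).elim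
  have hty : t = y := by
    rcases List.mem_cons.mp htb with h | h
    · exact h
    · exact absurd (hm ▸ hmy) (not_le.mpr ((List.pairwise_cons.mp hb).1 t h)).elim
  have htz : t = z := by
    rcases List.mem_cons.mp htc with h | h
    · exact h
    · exact absurd (hm ▸ hmz) (not_le.mpr ((List.pairwise_cons.mp hc).1 t h)).elim
  exact hne ⟨htx ▸ hty.symm ▸ rfl, hty ▸ htz.symm ▸ rfl⟩

-- membership in the merge = membership in all three (strictly sorted) lists
theorem pvMerge3_mem (a b c : List Int)
    (ha : a.Pairwise (· < ·)) (hb : b.Pairwise (· < ·)) (hc : c.Pairwise (· < ·)) (t : Int) :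
    t ∈ pvMerge3 a b c ↔ t ∈ a ∧ t ∈ b ∧ t ∈ c := by
  fun_induction pvMerge3 a b c with
  | case1 x a y b z c heq ih =>
    obtain ⟨hxy, hyz⟩ := heq
    subst hxy; subst hyz
    have ih' := ih (List.pairwise_cons.mp ha).2 (List.pairwise_cons.mp hb).2
      (List.pairwise_cons.mp hc).2
    by_cases htx : t = x
    · subst htx; simp
    · simp [htx, ih']
  | case2 x a y b z c hne ih =>
    have ha' : (if x = min x (min y z) then a else x :: a).Pairwise (· < ·) := by
      split_ifs
      · exact (List.pairwise_cons.mp ha).2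
      · exact ha
    have hb' : (if y = min x (min y z) then b else y :: b).Pairwise (· < ·) := by
      split_ifs
      · exact (List.pairwise_cons.mp hb).2
      · exact hb
    have hc' : (if z = min x (min y z) then c else z :: c).Pairwise (· < ·) := by
      split_ifs
      · exact (List.pairwise_cons.mp hc).2
      · exact hc
    simp only [dite_eq_ite] at ih
    rw [ih ha' hb' hc']
    constructor
    · rintro ⟨h1, h2, h3⟩
      refine ⟨?_, ?_, ?_⟩
      · revert h1; split_ifs with h <;> intro h1
        · exact List.mem_cons_of_mem _ h1
        · exact h1
      · revert h2; split_ifs with h <;> intro h2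
        · exact List.mem_cons_of_mem _ h2
        · exact h2
      · revert h3; split_ifs with h <;> intro h3
        · exact List.mem_cons_of_mem _ h3
        · exact h3
    · rintro ⟨h1, h2, h3⟩
      have htm : t ≠ min x (min y z) := pvMerge3_min_notMem ha hb hc hne h1 h2 h3
      refine ⟨?_, ?_, ?_⟩
      · split_ifs with h
        · rcases List.mem_cons.mp h1 with h' | h'
          · exact absurd (h' ▸ h) htm
          · exact h'
        · exact h1
      · split_ifs with h
        · rcases List.mem_cons.mp h2 with h' | h'
          · exact absurd (h' ▸ h) htm
          · exact h'
        · exact h2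
      · split_ifs with h
        · rcases List.mem_cons.mp h3 with h' | h'
          · exact absurd (h' ▸ h) htm
          · exact h'
        · exact h3
  | case3 a b c h =>
    simp only [List.not_mem_nil, false_iff]
    rintro ⟨h1, h2, h3⟩
    match a, b, c, h1, h2, h3 with
    | x :: a, y :: b, z :: c, _, _, _ => exact h x a y b z c rfl rfl rfl

-- the merge of strictly sorted lists is strictly sorted
theorem pvMerge3_pairwise (a b c : List Int)
    (ha : a.Pairwise (· < ·)) (hb : b.Pairwise (· < ·)) (hc : c.Pairwise (· < ·)) :
    (pvMerge3 a b c).Pairwise (· < ·) := by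
  fun_induction pvMerge3 a b c with
  | case1 x a y b z c heq ih =>
    obtain ⟨hxy, hyz⟩ := heq
    subst hxy; subst hyz
    have ha2 := (List.pairwise_cons.mp ha).2
    have hb2 := (List.pairwise_cons.mp hb).2
    have hc2 := (List.pairwise_cons.mp hc).2
    refine List.pairwise_cons.mpr ⟨?_, ih ha2 hb2 hc2⟩
    intro w hw
    exact (List.pairwise_cons.mp ha).1 w ((pvMerge3_mem a b c ha2 hb2 hc2 w).mp hw).1
  | case2 x a y b z c hne ih =>
    apply ih <;> split_ifs
    · exact (List.pairwise_cons.mp ha).2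
    · exact ha
    · exact (List.pairwise_cons.mp hb).2
    · exact hb
    · exact (List.pairwise_cons.mp hc).2
    · exact hc
  | case3 => exact List.Pairwise.nil

-- A's guarded set-building fold is Set.ofList of the filtered list
theorem pvFoldl_add_if (P : Int → Prop) [DecidablePred P] (A : List Int) (s : PySem.Set Int) :
    A.foldl (fun s i => if P i then PySem.Set.add s i else s) s
      = (A.filter (fun i => decide (P i))).foldl PySem.Set.add s := by
  induction A generalizing s with
  | nil => rfl
  | cons x A ih =>
    simp only [List.foldl_cons, List.filter_cons]
    by_cases h : P x
    · simp [h, ih]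
    · simp [h, ih]

theorem common_elements_tle_eq_alt (A B C : List Int) :
    common_elements_tle A B C = common_elements_tle_alt A B C := by
  unfold common_elements_tle common_elements_tle_alt
  have hS : A.foldl (fun s i => if i ∈ A ∧ i ∈ B ∧ i ∈ C then PySem.Set.add s i else s)
      PySem.Set.empty
      = PySem.Set.ofList (A.filter (fun i => decide (i ∈ A ∧ i ∈ B ∧ i ∈ C))) := by
    rw [pvFoldl_add_if (fun i => i ∈ A ∧ i ∈ B ∧ i ∈ C) A PySem.Set.empty]
    rfl
  rw [hS]
  set sA := PySem.List.sorted (PySem.Set.ofList A) (fun x => x) false with hsA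
  set sB := PySem.List.sorted (PySem.Set.ofList B) (fun x => x) false with hsB
  set sC := PySem.List.sorted (PySem.Set.ofList C) (fun x => x) false with hsC
  have hpA : sA.Pairwise (· < ·) := PySem.List.sorted_ofList_pairwise_lt A
  have hpB : sB.Pairwise (· < ·) := PySem.List.sorted_ofList_pairwise_lt B
  have hpC : sC.Pairwise (· < ·) := PySem.List.sorted_ofList_pairwise_lt C
  have hmA : ∀ t : Int, t ∈ sA ↔ t ∈ A := by
    intro t; rw [hsA, PySem.List.mem_sorted, PySem.Set.mem_ofList]
  have hmB : ∀ t : Int, t ∈ sB ↔ t ∈ B := by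
    intro t; rw [hsB, PySem.List.mem_sorted, PySem.Set.mem_ofList]
  have hmC : ∀ t : Int, t ∈ sC ↔ t ∈ C := by
    intro t; rw [hsC, PySem.List.mem_sorted, PySem.Set.mem_ofList]
  have hpR : (pvMerge3 sA sB sC).Pairwise (· < ·) := pvMerge3_pairwise _ _ _ hpA hpB hpC
  have hmR : ∀ t : Int, t ∈ pvMerge3 sA sB sC ↔ t ∈ A ∧ t ∈ B ∧ t ∈ C := by
    intro t
    rw [pvMerge3_mem _ _ _ hpA hpB hpC, hmA, hmB, hmC]
  apply PySem.List.sorted_eq_of_perm_of_pairwise_lt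
  · -- perm of the merge with the filtered set
    have hnR : (pvMerge3 sA sB sC).Nodup := hpR.imp ne_of_lt
    have hnS : (PySem.Set.ofList (A.filter (fun i => decide (i ∈ A ∧ i ∈ B ∧ i ∈ C)))).Nodup :=
      PySem.Set.nodup_ofList _
    refine (List.perm_ext_iff_of_nodup hnR hnS).mpr ?_
    intro t
    rw [hmR, PySem.Set.mem_ofList, List.mem_filter]
    simp only [decide_eq_true_eq]
    tauto
  · exact hpR

-- ===== VERDICT (by name: the statement is the Claim_ definition above) =====
theorem common_elements_tle_spec : Claim_equal_common_elements_tle := by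
  intro A B C _
  exact common_elements_tle_eq_alt A B C
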